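-- pv_equiv track=rewrite | github.com/andynguyen-tinyfish/discord-bot | app/formatter.py | _format_section_items
-- ===== SOURCE A (Python) =====
-- from typing import Any
--
-- def _format_section_items(items: Any, mentions: list[str] | None = None) -> str:
--     """Format a list of summary items into Discord bullet lines."""
--
--     normalized_items = _normalize_items(items)
--     if not normalized_items:
--         return "- No notable updates"
--
--     mention_map = _normalize_mentions(mentions, len(normalized_items))
--     lines: list[str] = []
--     for index, item in enumerate(normalized_items):
--         mention = mention_map[index]
--         suffix = f" (owner: {mention})" if mention else ""
--         lines.append(f"- {item}{suffix}")
--     return "\n".join(lines)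
--
-- def _normalize_items(items: Any) -> list[str]:
--     """Normalize summary section items into a clean list of strings."""
--
--     if not isinstance(items, list):
--         return []
--
--     normalized: list[str] = []
--     seen: set[str] = set()
--     for item in items:
--         if not isinstance(item, str):
--             continue
--         cleaned = item.strip()
--         if cleaned:
--             key = _canonicalize_item(cleaned)
--             if key in seen:
--                 continue
--             seen.add(key)
--             normalized.append(cleaned)
--
--     return normalized
--
-- def _canonicalize_item(item: str) -> str:
--     """Create a lightweight canonical key for duplicate removal."""
--
--     lowered = item.lower().strip()
--     compact = "".join(character if character.isalnum() or character.isspace() else " " for character in lowered)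
--     return " ".join(token for token in compact.split() if token)
--
-- def _normalize_mentions(mentions: list[str] | None, size: int) -> list[str]:
--     if not mentions:
--         return [""] * size
--     normalized = [str(item).strip() for item in mentions[:size]]
--     if len(normalized) < size:
--         normalized.extend([""] * (size - len(normalized)))
--     return normalized
-- ===== SOURCE B (Python) =====
-- def _canonicalize_item(item: str) -> str:
--     lowered = item.lower().strip()
--     compact = "".join(character if character.isalnum() or character.isspace() else " " for character in lowered)
--     return " ".join(token for token in compact.split() if token)
--
--
-- def _format_section_items(items, mentions=None):
--     """Sieve: pre-pair each kept item with its canonical key, then repeatedly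
--     emit the first surviving entry and purge all later entries sharing its key
--     (no seen-set is ever maintained)."""
--     if not isinstance(items, list):
--         return "- No notable updates"
--     rest = [(s, _canonicalize_item(s))
--             for s in (x.strip() for x in items if isinstance(x, str)) if s]
--     lines = []
--     while rest:
--         (cleaned, key), tail = rest[0], rest[1:]
--         i = len(lines)
--         mention = str(mentions[i]).strip() if mentions and i < len(mentions) else ""
--         lines.append(f"- {cleaned} (owner: {mention})" if mention else f"- {cleaned}")
--         rest = [p for p in tail if p[1] != key]
--     return "\n".join(lines) if lines else "- No notable updates"
-- ===== Notes on version B (the rewrite author's own statement) =====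
-- stated objective: alternative
-- what changed: B replaces A's seen-set dedup plus padded mention map plus formatting pass with an Eratosthenes-style sieve: it pre-pairs each non-blank item with its canonical key once, then repeatedly emits the first surviving entry's bullet line (mention looked up inline by the emitted-line count) and purges every later entry sharing that key, so no seen-set and no mention map exist.
import Mathlib
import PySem

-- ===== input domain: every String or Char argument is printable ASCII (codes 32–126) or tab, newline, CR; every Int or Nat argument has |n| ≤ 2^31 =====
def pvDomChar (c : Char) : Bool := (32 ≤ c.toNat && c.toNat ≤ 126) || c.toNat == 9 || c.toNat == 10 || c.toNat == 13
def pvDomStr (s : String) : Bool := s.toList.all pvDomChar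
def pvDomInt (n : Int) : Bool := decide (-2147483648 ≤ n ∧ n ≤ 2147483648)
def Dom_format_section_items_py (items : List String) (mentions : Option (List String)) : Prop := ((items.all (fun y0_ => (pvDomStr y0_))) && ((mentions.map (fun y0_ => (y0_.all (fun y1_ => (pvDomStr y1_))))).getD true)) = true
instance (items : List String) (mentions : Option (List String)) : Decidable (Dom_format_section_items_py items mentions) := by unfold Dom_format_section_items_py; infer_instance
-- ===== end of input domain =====

-- B replaces A's seen-set dedup + padded mention map + formatting pass with a sieve that
-- emits the first surviving (item, key) pair and purges later pairs with the same key;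
-- objective: alternative (same result, different mechanism, no speed claim).

-- ===== PORT A =====
-- _canonicalize_item (textually identical helper in Source A and Source B, shared by both ports)
def pvCanonKey (item : String) : String :=
  let lowered := PySem.Str.strip (PySem.Str.lower item)
  let compact := String.ofList (lowered.toList.map
    (fun character => if PySem.Chars.isalnum character || PySem.Chars.isspace character then character else ' '))
  PySem.Str.join " " ((PySem.Str.split₀ compact).filter (fun token => token ≠ ""))

-- loop body of _normalize_items (isinstance checks always pass: items : List String)
def pvNormStep (st : List String × PySem.Set String) (item : String) : List String × PySem.Set String :=
  let cleaned := PySem.Str.strip item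
  if cleaned ≠ "" then
    let key := pvCanonKey cleaned
    if PySem.Set.contains st.2 key then st
    else (st.1 ++ [cleaned], PySem.Set.add st.2 key)
  else st

def pvNormalizeItems (items : List String) : List String :=
  (items.foldl pvNormStep ([], PySem.Set.empty)).1

def pvNormalizeMentions (mentions : Option (List String)) (size : Nat) : List String :=
  match mentions with
  | none => List.replicate size ""
  | some ms =>
    if ms = [] then List.replicate size ""
    else
      let normalized := (PySem.List.slice ms none (some (size : Int))).map PySem.Str.strip
      if normalized.length < size then normalized ++ List.replicate (size - normalized.length) ""
      else normalized

def format_section_items_py (items : List String) (mentions : Option (List String)) : String :=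
  let normalized := pvNormalizeItems items
  if normalized = [] then "- No notable updates"
  else
    let mentionMap := pvNormalizeMentions mentions normalized.length
    let lines := (PySem.List.enumerate normalized 0).foldl (fun lines p =>
      -- mention_map[index]: index is always in range, getD "" is never taken
      let mention := (PySem.List.pyGet? mentionMap p.1).getD ""
      let suffix := if mention ≠ "" then " (owner: " ++ mention ++ ")" else ""
      lines ++ ["- " ++ p.2 ++ suffix]) ([] : List String)
    PySem.Str.join "\n" lines

-- ===== PORT B =====
-- str(mentions[i]).strip() if mentions and i < len(mentions) else ""  (str is identity; index in range)
def pvMentionAt (mentions : Option (List String)) (i : Nat) : String :=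
  match mentions with
  | some ms => if ms ≠ [] ∧ i < ms.length then PySem.Str.strip (ms.getD i "") else ""
  | none => ""

-- the pair-building comprehension: (s, key) for each non-blank stripped item
def pvKeyPairs (items : List String) : List (String × String) :=
  items.filterMap (fun x =>
    let s := PySem.Str.strip x
    if s = "" then none else some (s, pvCanonKey s))

-- the while loop: emit the first surviving pair's line, purge later pairs with its key
def pvSieve (mentions : Option (List String)) : List (String × String) → List String → List String
  | [], lines => lines
  | (cleaned, key) :: tail, lines =>
    let mention := pvMentionAt mentions lines.length
    let line := if mention ≠ "" then "- " ++ cleaned ++ " (owner: " ++ mention ++ ")"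
                else "- " ++ cleaned
    pvSieve mentions (tail.filter (fun p => p.2 != key)) (lines ++ [line])
  termination_by rest _ => rest.length
  decreasing_by simpa using Nat.lt_succ_of_le (List.length_filter_le _ tail.attach)

def format_section_items_py_alt (items : List String) (mentions : Option (List String)) : String :=
  let lines := pvSieve mentions (pvKeyPairs items) []
  if lines = [] then "- No notable updates" else PySem.Str.join "\n" lines

-- ===== PRECONDITION & SPEC =====
def Spec_format_section_items_py (items : List String) (mentions : Option (List String)) (out : String) : Prop := out = format_section_items_py_alt items mentions
instance (items : List String) (mentions : Option (List String)) (out : String) : Decidable (Spec_format_section_items_py items mentions out) := by unfold Spec_format_section_items_py; infer_instance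

-- ===== CLAIM (what is proved, stated in full; the proofs are below) =====
def Claim_equal_format_section_items_py : Prop := ∀ (items : List String) (mentions : Option (List String)), Dom_format_section_items_py items mentions → Spec_format_section_items_py items mentions (format_section_items_py items mentions)

-- ===== LEMMAS AND PROOFS =====

-- the bullet line built for the i-th kept item
def pvLineOf (mentions : Option (List String)) (i : Nat) (cleaned : String) : String :=
  let mention := pvMentionAt mentions i
  if mention ≠ "" then "- " ++ cleaned ++ " (owner: " ++ mention ++ ")" else "- " ++ cleaned

def pvLinesAux (mentions : Option (List String)) (i : Nat) : List String → List String
  | [] => []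
  | x :: xs => pvLineOf mentions i x :: pvLinesAux mentions (i + 1) xs

-- A's normalization loop as a pure function of the remaining items and the seen set
def pvNormL (seen : PySem.Set String) : List String → List String
  | [] => []
  | x :: xs =>
    let c := PySem.Str.strip x
    if c = "" then pvNormL seen xs
    else if PySem.Set.contains seen (pvCanonKey c) then pvNormL seen xs
    else c :: pvNormL (PySem.Set.add seen (pvCanonKey c)) xs

-- B's sieve on pairs, stripped of line formatting: the list of kept cleaned strings
def pvCleanSieve : List (String × String) → List String
  | [] => []
  | (c, k) :: tail => c :: pvCleanSieve (tail.filter (fun p => p.2 != k))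
  termination_by rest => rest.length
  decreasing_by simpa using Nat.lt_succ_of_le (List.length_filter_le _ tail.attach)

theorem pvLinesAux_length (m : Option (List String)) (i : Nat) (l : List String) :
    (pvLinesAux m i l).length = l.length := by
  induction l generalizing i with
  | nil => rfl
  | cons x xs ih => simp [pvLinesAux, ih]

-- A's foldl over pvNormStep computes pvNormL
theorem pvNorm_foldl (items : List String) (pre : List String) (seen : PySem.Set String) :
    (items.foldl pvNormStep (pre, seen)).1 = pre ++ pvNormL seen items := by
  induction items generalizing pre seen with
  | nil => simp [pvNormL]
  | cons x xs ih =>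
    rw [List.foldl_cons]
    by_cases hc : PySem.Str.strip x = ""
    · rw [show pvNormStep (pre, seen) x = (pre, seen) from by simp [pvNormStep, hc], ih,
        show pvNormL seen (x :: xs) = pvNormL seen xs from by simp [pvNormL, hc]]
    · by_cases hk : pvCanonKey (PySem.Str.strip x) ∈ seen
      · rw [show pvNormStep (pre, seen) x = (pre, seen) from by
            simp [pvNormStep, PySem.Set.contains, hc, hk], ih,
          show pvNormL seen (x :: xs) = pvNormL seen xs from by
            simp [pvNormL, PySem.Set.contains, hc, hk]]
      · rw [show pvNormStep (pre, seen) x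
              = (pre ++ [PySem.Str.strip x], PySem.Set.add seen (pvCanonKey (PySem.Str.strip x)))
            from by simp [pvNormStep, PySem.Set.contains, hc, hk],
          ih,
          show pvNormL seen (x :: xs)
              = PySem.Str.strip x :: pvNormL (PySem.Set.add seen (pvCanonKey (PySem.Str.strip x))) xs
            from by simp [pvNormL, PySem.Set.contains, hc, hk]]
        simp

-- membership in an extended PySem set
theorem pvContains_add (s : PySem.Set String) (k y : String) :
    PySem.Set.contains (PySem.Set.add s k) y = (PySem.Set.contains s y || y == k) := by
  simp only [PySem.Set.add, PySem.Set.contains]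
  by_cases hk : k ∈ s
  · by_cases hy : y = k
    · subst hy; simp [hk]
    · simp [hk, hy]
  · by_cases hy : y = k
    · subst hy; simp [hk]
    · simp [hk, hy]

-- the sieve on the pairs not yet seen computes A's normalization
theorem pvCleanSieve_normL (items : List String) (seen : PySem.Set String) :
    pvNormL seen items
      = pvCleanSieve ((pvKeyPairs items).filter (fun p => !PySem.Set.contains seen p.2)) := by
  induction items generalizing seen with
  | nil => simp [pvNormL, pvKeyPairs, pvCleanSieve]
  | cons x xs ih =>
    by_cases hc : PySem.Str.strip x = ""
    · rw [show pvNormL seen (x :: xs) = pvNormL seen xs from by simp [pvNormL, hc],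
        show pvKeyPairs (x :: xs) = pvKeyPairs xs from by simp [pvKeyPairs, hc]]
      exact ih seen
    · rw [show pvKeyPairs (x :: xs)
            = (PySem.Str.strip x, pvCanonKey (PySem.Str.strip x)) :: pvKeyPairs xs
          from by simp [pvKeyPairs, hc]]
      by_cases hk : pvCanonKey (PySem.Str.strip x) ∈ seen
      · rw [show pvNormL seen (x :: xs) = pvNormL seen xs from by
            simp [pvNormL, PySem.Set.contains, hc, hk],
          show ((PySem.Str.strip x, pvCanonKey (PySem.Str.strip x)) :: pvKeyPairs xs).filter
                (fun p => !PySem.Set.contains seen p.2)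
              = (pvKeyPairs xs).filter (fun p => !PySem.Set.contains seen p.2)
            from by simp [PySem.Set.contains, hk]]
        exact ih seen
      · rw [show pvNormL seen (x :: xs)
              = PySem.Str.strip x
                  :: pvNormL (PySem.Set.add seen (pvCanonKey (PySem.Str.strip x))) xs
            from by simp [pvNormL, PySem.Set.contains, hc, hk],
          show ((PySem.Str.strip x, pvCanonKey (PySem.Str.strip x)) :: pvKeyPairs xs).filter
                (fun p => !PySem.Set.contains seen p.2)
              = (PySem.Str.strip x, pvCanonKey (PySem.Str.strip x))
                  :: (pvKeyPairs xs).filter (fun p => !PySem.Set.contains seen p.2)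
            from by simp [PySem.Set.contains, hk]]
        rw [show pvCleanSieve ((PySem.Str.strip x, pvCanonKey (PySem.Str.strip x))
              :: (pvKeyPairs xs).filter (fun p => !PySem.Set.contains seen p.2))
            = PySem.Str.strip x :: pvCleanSieve
                (((pvKeyPairs xs).filter (fun p => !PySem.Set.contains seen p.2)).filter
                  (fun p => p.2 != pvCanonKey (PySem.Str.strip x)))
          from by simp [pvCleanSieve]]
        congr 1
        have harg : ((pvKeyPairs xs).filter (fun p => !PySem.Set.contains seen p.2)).filter
              (fun p => p.2 != pvCanonKey (PySem.Str.strip x))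
            = (pvKeyPairs xs).filter
              (fun p => !PySem.Set.contains (PySem.Set.add seen (pvCanonKey (PySem.Str.strip x))) p.2) := by
          rw [List.filter_filter]
          apply List.filter_congr
          intro p _
          simp only [pvContains_add, Bool.not_or, bne]
          rw [Bool.and_comm]
        rw [harg]
        exact ih (PySem.Set.add seen (pvCanonKey (PySem.Str.strip x)))

-- running the sieve with line formatting is formatting the clean sieve's output
theorem pvSieve_lines (m : Option (List String)) :
    ∀ (n : Nat) (rest : List (String × String)) (lines : List String), rest.length ≤ n →
      pvSieve m rest lines = lines ++ pvLinesAux m lines.length (pvCleanSieve rest) := by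
  intro n
  induction n with
  | zero =>
    intro rest lines h
    have hr : rest = [] := List.eq_nil_of_length_eq_zero (Nat.le_zero.mp h)
    subst hr
    simp [pvSieve, pvCleanSieve, pvLinesAux]
  | succ n ih =>
    intro rest lines h
    match rest with
    | [] => simp [pvSieve, pvCleanSieve, pvLinesAux]
    | (c, k) :: tail =>
      rw [show pvSieve m ((c, k) :: tail) lines
            = pvSieve m (tail.filter (fun p => p.2 != k))
                (lines ++ [if pvMentionAt m lines.length ≠ "" then
                    "- " ++ c ++ " (owner: " ++ pvMentionAt m lines.length ++ ")" else "- " ++ c])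
          from by simp [pvSieve],
        show pvCleanSieve ((c, k) :: tail)
            = c :: pvCleanSieve (tail.filter (fun p => p.2 != k))
          from by simp [pvCleanSieve]]
      rw [ih (tail.filter (fun p => p.2 != k)) _
        (Nat.le_trans (List.length_filter_le _ _) (by simpa using h))]
      simp only [pvLinesAux, List.length_append, List.length_cons, List.length_nil]
      rw [show (if pvMentionAt m lines.length ≠ "" then
            "- " ++ c ++ " (owner: " ++ pvMentionAt m lines.length ++ ")" else "- " ++ c)
          = pvLineOf m lines.length c from by simp [pvLineOf]]
      simp [List.append_assoc]

-- the mention A looks up at index i equals B's inline mention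
theorem pvMention_lookup (mentions : Option (List String)) (size i : Nat) (hi : i < size) :
    (pvNormalizeMentions mentions size)[i]? = some (pvMentionAt mentions i) := by
  match mentions with
  | none => simp [pvNormalizeMentions, pvMentionAt, hi]
  | some ms =>
    by_cases hms : ms = []
    · simp [pvNormalizeMentions, pvMentionAt, hms, hi]
    · simp only [pvNormalizeMentions, if_neg hms]
      rw [PySem.List.slice_to ms (by exact Int.natCast_nonneg size)]
      simp only [Int.toNat_natCast]
      by_cases him : i < ms.length
      · have hit : i < (List.take size ms).length := by simp [List.length_take]; omega
        have hget : ((List.take size ms).map PySem.Str.strip)[i]? =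
            some (PySem.Str.strip ms[i]) := by
          simp [hi, him]
        by_cases hpad : ((List.take size ms).map PySem.Str.strip).length < size
        · rw [if_pos hpad, List.getElem?_append_left (by simpa using hit), hget]
          simp [pvMentionAt, hms, him, List.getD_eq_getElem?_getD]
        · rw [if_neg hpad, hget]
          simp [pvMentionAt, hms, him, List.getD_eq_getElem?_getD]
      · have hlen : ((List.take size ms).map PySem.Str.strip).length = ms.length := by
          simp [List.length_take]; omega
        have hpad : ((List.take size ms).map PySem.Str.strip).length < size := by omega
        rw [if_pos hpad, List.getElem?_append_right (by omega)]
        simp only [hlen]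
        rw [List.getElem?_replicate]
        simp [pvMentionAt, hms, him, show i - ms.length < size - ms.length by omega]

-- A's line-building fold over enumerate is pvLinesAux, provided every index is in range
theorem pvAFold_lines (mentions : Option (List String)) (size : Nat)
    (l : List String) (s : Nat) (acc : List String) (hle : s + l.length ≤ size) :
    (PySem.List.enumerate l (s : Int)).foldl (fun lines p =>
        lines ++ ["- " ++ p.2 ++
          if (PySem.List.pyGet? (pvNormalizeMentions mentions size) p.1).getD "" ≠ "" then
            " (owner: " ++ (PySem.List.pyGet? (pvNormalizeMentions mentions size) p.1).getD "" ++ ")"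
          else ""]) acc
      = acc ++ pvLinesAux mentions s l := by
  induction l generalizing s acc with
  | nil => simp [PySem.List.enumerate_nil, pvLinesAux]
  | cons x xs ih =>
    rw [PySem.List.enumerate_cons, List.foldl_cons]
    have hs : s < size := by simp at hle; omega
    have hlook : (PySem.List.pyGet? (pvNormalizeMentions mentions size) (s : Int)).getD "" =
        pvMentionAt mentions s := by
      rw [PySem.List.pyGet?_natCast, pvMention_lookup mentions size s hs]
      rfl
    simp only [hlook]
    rw [show ((s : Int) + 1) = ((s + 1 : Nat) : Int) from by omega,
      ih (s + 1) _ (by simp at hle ⊢; omega)]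
    by_cases hm : pvMentionAt mentions s = "" <;>
      simp [pvLinesAux, pvLineOf, hm, String.append_assoc]

theorem pvAFold_lines0 (mentions : Option (List String)) (l : List String) :
    (PySem.List.enumerate l 0).foldl (fun lines p =>
        lines ++ ["- " ++ p.2 ++
          if (PySem.List.pyGet? (pvNormalizeMentions mentions l.length) p.1).getD "" ≠ "" then
            " (owner: " ++ (PySem.List.pyGet? (pvNormalizeMentions mentions l.length) p.1).getD "" ++ ")"
          else ""]) []
      = pvLinesAux mentions 0 l := by
  have h := pvAFold_lines mentions l.length l 0 [] (by omega)
  simpa using h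

-- ===== VERDICT (by name: the statement is the Claim_ definition above) =====
theorem format_section_items_py_spec : Claim_equal_format_section_items_py := by
  intro items mentions _
  unfold Spec_format_section_items_py format_section_items_py format_section_items_py_alt
    pvNormalizeItems
  simp only []
  have hfilter : (pvKeyPairs items).filter (fun p => !PySem.Set.contains PySem.Set.empty p.2)
      = pvKeyPairs items := by
    apply List.filter_eq_self.mpr
    intro p _
    simp [PySem.Set.contains, PySem.Set.empty]
  have hBS : pvCleanSieve (pvKeyPairs items) = pvNormL PySem.Set.empty items := by
    rw [pvCleanSieve_normL items PySem.Set.empty, hfilter]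
  rw [show (items.foldl pvNormStep ([], PySem.Set.empty)).1 = pvNormL PySem.Set.empty items from by
      simpa using pvNorm_foldl items [] PySem.Set.empty]
  rw [pvSieve_lines mentions (pvKeyPairs items).length (pvKeyPairs items) [] (Nat.le_refl _)]
  rw [hBS]
  simp only [List.nil_append, List.length_nil]
  by_cases hnil : pvNormL PySem.Set.empty items = []
  · rw [if_pos hnil, if_pos (by rw [hnil]; rfl)]
  · have hnil' : pvLinesAux mentions 0 (pvNormL PySem.Set.empty items) ≠ [] := by
      intro h
      have hl := pvLinesAux_length mentions 0 (pvNormL PySem.Set.empty items)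
      rw [h] at hl
      exact hnil (List.length_eq_zero_iff.mp hl.symm)
    rw [if_neg hnil, if_neg hnil', pvAFold_lines0 mentions (pvNormL PySem.Set.empty items)]
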